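-- pv_equiv track=rewrite | github.com/sarangKP/Learning-Agent | state_classifier.py | _trailing_noncalm_streak
-- ===== SOURCE A (Python) =====
-- from typing import Tuple, List, Optional
--
-- def _trailing_noncalm_streak(window: List[str]) -> int:
--     """Count how many consecutive non-calm entries END the window."""
--     streak = 0
--     for entry in reversed(window):
--         if entry != "calm":
--             streak += 1
--         else:
--             break
--     return streak
-- ===== SOURCE B (Python) =====
-- def _trailing_noncalm_streak(window):
--     """Count how many consecutive non-calm entries END the window."""
--     last_calm = -1
--     for i, entry in enumerate(window):
--         if entry == "calm":
--             last_calm = i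
--     return len(window) - last_calm - 1
-- ===== Notes on version B (the rewrite author's own statement) =====
-- stated objective: alternative
-- what changed: B replaces A's backward loop with early break by a forward whole-list scan that records the index of the last 'calm' entry (default -1) and returns len(window) - last_calm - 1 as arithmetic.
import Mathlib
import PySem

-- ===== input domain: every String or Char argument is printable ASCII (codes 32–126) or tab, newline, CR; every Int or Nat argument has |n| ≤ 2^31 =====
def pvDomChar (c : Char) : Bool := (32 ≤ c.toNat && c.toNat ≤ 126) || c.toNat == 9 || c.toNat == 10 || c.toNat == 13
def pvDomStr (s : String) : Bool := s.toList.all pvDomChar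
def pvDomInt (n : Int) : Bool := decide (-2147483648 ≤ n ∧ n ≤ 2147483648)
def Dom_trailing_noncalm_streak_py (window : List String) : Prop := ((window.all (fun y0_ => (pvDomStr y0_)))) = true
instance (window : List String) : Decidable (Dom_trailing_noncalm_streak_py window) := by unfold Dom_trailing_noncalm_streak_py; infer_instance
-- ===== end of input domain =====

-- B replaces A's backward loop-with-break by a forward scan for the last 'calm' index plus arithmetic (alternative decomposition, same cost).
-- ===== PORT A =====
-- A's 'for entry in reversed(window)' with break: recursion over window.reverse, stopping at "calm"
def pvLoopA : List String → Int
  | [] => 0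
  | e :: rest => if e != "calm" then 1 + pvLoopA rest else 0

def trailing_noncalm_streak_py (window : List String) : Int := pvLoopA window.reverse

-- ===== PORT B =====
-- B's 'for i, entry in enumerate(window)' tracking the last index where entry == "calm"
def pvScanB : List String → Int → Int → Int
  | [], _, last => last
  | e :: rest, i, last => pvScanB rest (i + 1) (if e == "calm" then i else last)

def trailing_noncalm_streak_py_alt (window : List String) : Int :=
  (window.length : Int) - pvScanB window 0 (-1) - 1

-- ===== PRECONDITION & SPEC =====
def Spec_trailing_noncalm_streak_py (window : List String) (out : Int) : Prop := out = trailing_noncalm_streak_py_alt window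
instance (window : List String) (out : Int) : Decidable (Spec_trailing_noncalm_streak_py window out) := by unfold Spec_trailing_noncalm_streak_py; infer_instance

-- ===== CLAIM (what is proved, stated in full; the proofs are below) =====
def Claim_equal_trailing_noncalm_streak_py : Prop := ∀ (window : List String), Dom_trailing_noncalm_streak_py window → Spec_trailing_noncalm_streak_py window (trailing_noncalm_streak_py window)

-- ===== LEMMAS AND PROOFS =====
theorem pvScanB_append (xs : List String) (x : String) :
    ∀ (i last : Int), pvScanB (xs ++ [x]) i last =
      if x == "calm" then i + (xs.length : Int) else pvScanB xs i last := by
  induction xs with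
  | nil => intro i last; simp [pvScanB]
  | cons a as ih =>
      intro i last
      simp only [List.cons_append, pvScanB, ih, List.length_cons]
      split_ifs <;> push_cast <;> ring_nf

theorem pv_main (window : List String) :
    trailing_noncalm_streak_py window = trailing_noncalm_streak_py_alt window := by
  induction window using List.reverseRecOn with
  | nil => decide
  | append_singleton xs x ih =>
      simp only [trailing_noncalm_streak_py, trailing_noncalm_streak_py_alt,
        List.reverse_append, List.reverse_singleton, List.singleton_append,
        pvLoopA, pvScanB_append, List.length_append, List.length_singleton] at *
      by_cases h : x == "calm"
      · simp only [h, if_pos]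
        have : (x != "calm") = false := by simp at h; simp [h]
        simp [this]
      · have h' : (x != "calm") = true := by simp at h ⊢; exact h
        simp only [h, if_neg, Bool.false_eq_true, not_false_iff, h', if_true, ih]
        push_cast; ring

-- ===== VERDICT (by name: the statement is the Claim_ definition above) =====
theorem trailing_noncalm_streak_py_spec : Claim_equal_trailing_noncalm_streak_py := by
  intro window _
  unfold Spec_trailing_noncalm_streak_py
  exact pv_main window
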